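-- pv_equiv track=rewrite | github.com/ben-hutchinson/pokeleximon | services/cryptic-ml/cryptic_ml/validator.py | _deletion_can_make_answer
-- ===== SOURCE A (Python) =====
-- from collections import Counter
--
-- def _deletion_can_make_answer(fodder: str, remove: str, answer: str) -> bool:
--     if not remove:
--         return False
--
--     fodder_counter = Counter(fodder)
--     remove_counter = Counter(remove)
--
--     for char, count in remove_counter.items():
--         if fodder_counter[char] < count:
--             return False
--         fodder_counter[char] -= count
--
--     rebuilt = []
--     for char, count in fodder_counter.items():
--         rebuilt.extend(char for _ in range(count))
--
--     return Counter("".join(rebuilt)) == Counter(answer)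
-- ===== SOURCE B (Python) =====
-- def _deletion_can_make_answer(fodder: str, remove: str, answer: str) -> bool:
--     # Deleting remove's characters from fodder can leave exactly answer iff
--     # fodder is a rearrangement of remove + answer: compare canonical sorted forms.
--     if not remove:
--         return False
--     return sorted(fodder) == sorted(remove + answer)
-- ===== Notes on version B (the rewrite author's own statement) =====
-- stated objective: simpler
-- what changed: Replaces the counter subtraction loop, dict mutation, string rebuild and recount by a sort-and-compare: fodder minus remove equals answer iff sorted(fodder) == sorted(remove + answer); no Counter at all.
import Mathlib
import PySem

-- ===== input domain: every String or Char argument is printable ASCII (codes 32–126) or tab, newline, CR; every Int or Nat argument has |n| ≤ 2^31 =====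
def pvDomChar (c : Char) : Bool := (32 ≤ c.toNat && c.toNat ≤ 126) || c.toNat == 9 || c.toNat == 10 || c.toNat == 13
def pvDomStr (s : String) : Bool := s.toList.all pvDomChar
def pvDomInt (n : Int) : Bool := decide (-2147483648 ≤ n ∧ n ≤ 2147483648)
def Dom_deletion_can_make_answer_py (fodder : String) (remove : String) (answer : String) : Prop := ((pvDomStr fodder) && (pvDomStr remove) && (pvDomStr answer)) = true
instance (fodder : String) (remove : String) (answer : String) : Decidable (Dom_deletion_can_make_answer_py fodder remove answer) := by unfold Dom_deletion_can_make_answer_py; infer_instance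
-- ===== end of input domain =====

-- B replaces A's counter subtraction loop, mutation, string rebuild and recount by a
-- sort-and-compare: sorted(fodder) == sorted(remove + answer) (objective: simpler).

-- ===== PORT A =====
-- Python's Counter '==' ignores insertion order: ported as CPython's Counter.__eq__,
-- 'all(self[e] == other[e] for c in (self, other) for e in c)' (exact).
def pvCounterEq (d1 d2 : PySem.Dict Char Int) : Bool :=
  (d1.keys.all fun k => d1.getD k 0 == d2.getD k 0) &&
  (d2.keys.all fun k => d1.getD k 0 == d2.getD k 0)

-- the 'for char, count in remove_counter.items()' loop with its early 'return False'
def pvSubtractLoop : List (Char × Int) → PySem.Dict Char Int → Option (PySem.Dict Char Int)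
  | [], fc => some fc
  | (c, n) :: rest, fc =>
    if fc.getD c 0 < n then none
    else pvSubtractLoop rest (fc.modify c 0 (· - n))

def deletion_can_make_answer_py (fodder : String) (remove : String) (answer : String) : Bool :=
  if remove.toList.isEmpty then false
  else
    match pvSubtractLoop (PySem.Dict.counter remove.toList).items (PySem.Dict.counter fodder.toList) with
    | none => false
    | some fc' =>
      let rebuilt := fc'.items.foldl
        (fun acc p => acc ++ (PySem.List.pyRange 0 p.2 1).map (fun _ => p.1)) ([] : List Char)
      pvCounterEq (PySem.Dict.counter rebuilt) (PySem.Dict.counter answer.toList)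

-- ===== PORT B =====
def deletion_can_make_answer_py_alt (fodder : String) (remove : String) (answer : String) : Bool :=
  if remove.toList.isEmpty then false
  else
    PySem.List.sorted fodder.toList (fun x => x) ==
      PySem.List.sorted (remove.toList ++ answer.toList) (fun x => x)

-- ===== PRECONDITION & SPEC =====
def Spec_deletion_can_make_answer_py (fodder : String) (remove : String) (answer : String) (out : Bool) : Prop := out = deletion_can_make_answer_py_alt fodder remove answer
instance (fodder : String) (remove : String) (answer : String) (out : Bool) : Decidable (Spec_deletion_can_make_answer_py fodder remove answer out) := by unfold Spec_deletion_can_make_answer_py; infer_instance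

-- ===== CLAIM (what is proved, stated in full; the proofs are below) =====
def Claim_equal_deletion_can_make_answer_py : Prop := ∀ (fodder : String) (remove : String) (answer : String), Dom_deletion_can_make_answer_py fodder remove answer → Spec_deletion_can_make_answer_py fodder remove answer (deletion_can_make_answer_py fodder remove answer)

-- ===== LEMMAS AND PROOFS =====

-- the common characterisation both programs are proved equivalent to
def pvGood (f r a : List Char) : Prop :=
  r ≠ [] ∧ ∀ c : Char, (f.count c : Int) = r.count c + a.count c

lemma counterEq_true_iff (d1 d2 : PySem.Dict Char Int)
    (h1 : ∀ c, c ∉ d1.keys → d1.getD c 0 = 0)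
    (h2 : ∀ c, c ∉ d2.keys → d2.getD c 0 = 0) :
    pvCounterEq d1 d2 = true ↔ ∀ c, d1.getD c 0 = d2.getD c 0 := by
  simp only [pvCounterEq, Bool.and_eq_true, List.all_eq_true, beq_iff_eq]
  constructor
  · rintro ⟨ha, hb⟩ c
    by_cases hc1 : c ∈ d1.keys
    · exact ha c hc1
    by_cases hc2 : c ∈ d2.keys
    · exact hb c hc2
    · rw [h1 c hc1, h2 c hc2]
  · intro h; exact ⟨fun c _ => h c, fun c _ => h c⟩

lemma getD_counter_not_mem (xs : List Char) (c : Char)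
    (h : c ∉ (PySem.Dict.counter xs).keys) : (PySem.Dict.counter xs).getD c 0 = 0 := by
  rw [PySem.Dict.getD_counter]
  rw [PySem.Dict.keys_counter, PySem.Set.mem_ofList] at h
  simp [List.count_eq_zero.mpr h]

-- B's characterisation
lemma alt_iff (f r a : String) :
    deletion_can_make_answer_py_alt f r a = true ↔ pvGood f.toList r.toList a.toList := by
  unfold deletion_can_make_answer_py_alt pvGood
  by_cases h0 : r.toList.isEmpty = true
  · rw [if_pos h0]
    apply iff_of_false
    · exact fun h => Bool.noConfusion h
    · rintro ⟨hr, -⟩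
      exact hr (List.isEmpty_iff.mp h0)
  · rw [if_neg h0]
    have hr0 : r.toList ≠ [] := fun h => h0 (by rw [h]; rfl)
    rw [beq_iff_eq, PySem.List.sorted_id_eq_sorted_id_iff_perm, List.perm_iff_count]
    constructor
    · intro h
      refine ⟨hr0, fun c => ?_⟩
      have := h c
      rw [List.count_append] at this
      push_cast [this]
      ring
    · rintro ⟨-, h⟩ c
      have := h c
      rw [List.count_append]
      omega

lemma pvAllCongr {α : Type} (l : List α) (p q : α → Bool)
    (h : ∀ x ∈ l, p x = q x) : l.all p = l.all q := by
  induction l with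
  | nil => rfl
  | cons x l ih =>
    simp only [List.all_cons]
    rw [h x (List.mem_cons_self), ih (fun y hy => h y (List.mem_cons_of_mem _ hy))]

-- the subtraction loop, over distinct keys with their values given by a function
lemma subLoop_spec (l : List Char) (g : Char → Int) (d : PySem.Dict Char Int) (hnd : l.Nodup) :
    pvSubtractLoop (l.map fun k => (k, g k)) d =
      if l.all (fun k => !(d.getD k 0 < g k)) then
        some (l.foldl (fun acc k => acc.modify k 0 (· - g k)) d) else none := by
  induction l generalizing d with
  | nil => simp [pvSubtractLoop]
  | cons k l ih =>
    simp only [List.map_cons, pvSubtractLoop, List.all_cons, List.foldl_cons]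
    by_cases hk : d.getD k 0 < g k
    · simp [hk]
    · rw [if_neg hk, ih _ (List.Nodup.of_cons hnd)]
      have hcond : l.all (fun x => !((d.modify k 0 (· - g k)).getD x 0 < g x)) =
          l.all (fun x => !(d.getD x 0 < g x)) := by
        apply pvAllCongr
        intro x hx
        have hne : x ≠ k := fun h => (List.nodup_cons.mp hnd).1 (h ▸ hx)
        rw [PySem.Dict.getD_modify_of_ne _ _ _ hne]
      rw [hcond]
      simp [hk]

lemma getD_foldl_modify_sub (l : List Char) (g : Char → Int) (d : PySem.Dict Char Int)
    (c : Char) (hnd : l.Nodup) :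
    (l.foldl (fun acc k => acc.modify k 0 (· - g k)) d).getD c 0 =
      d.getD c 0 - (if c ∈ l then g c else 0) := by
  induction l generalizing d with
  | nil => simp
  | cons k l ih =>
    simp only [List.foldl_cons, List.mem_cons]
    rw [ih _ (List.Nodup.of_cons hnd)]
    by_cases hk : c = k
    · subst hk
      have : c ∉ l := (List.nodup_cons.mp hnd).1
      simp [this, PySem.Dict.getD_modify_self]
    · rw [PySem.Dict.getD_modify_of_ne _ _ _ hk]
      simp [hk]

lemma count_rebuilt_aux (ps : List (Char × Int)) (acc : List Char) (c : Char) :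
    (ps.foldl (fun acc p => acc ++ (PySem.List.pyRange 0 p.2 1).map (fun _ => p.1)) acc).count c
      = acc.count c + (ps.map (fun p => if p.1 = c then (p.2).toNat else 0)).sum := by
  induction ps generalizing acc with
  | nil => simp
  | cons p ps ih =>
    simp only [List.foldl_cons, List.map_cons, List.sum_cons]
    rw [ih]
    have hblock : ((PySem.List.pyRange 0 p.2 1).map (fun _ => p.1)).count c =
        if p.1 = c then (p.2).toNat else 0 := by
      rw [List.map_const', List.count_replicate, PySem.List.length_pyRange_one]
      by_cases h : p.1 = c <;> simp [h]
    rw [List.count_append, hblock]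
    omega

lemma sum_map_ite_nodup (l : List Char) (t : Char → Nat) (c : Char) (hnd : l.Nodup) :
    (l.map (fun k => if k = c then t k else 0)).sum = if c ∈ l then t c else 0 := by
  induction l with
  | nil => simp
  | cons k l ih =>
    simp only [List.map_cons, List.sum_cons, List.mem_cons]
    rw [ih (List.Nodup.of_cons hnd)]
    by_cases hk : k = c
    · subst hk
      have : k ∉ l := (List.nodup_cons.mp hnd).1
      simp [this]
    · have hck : ¬ c = k := fun hh => hk hh.symm
      simp [hk, hck]

-- A's characterisation
lemma a_iff (f r a : String) :
    deletion_can_make_answer_py f r a = true ↔ pvGood f.toList r.toList a.toList := by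
  unfold deletion_can_make_answer_py pvGood
  by_cases h0 : r.toList.isEmpty = true
  · rw [if_pos h0]
    apply iff_of_false
    · exact fun h => Bool.noConfusion h
    · rintro ⟨hr, -⟩
      exact hr (List.isEmpty_iff.mp h0)
  · rw [if_neg h0]
    have hr0 : r.toList ≠ [] := by
      intro h; exact h0 (by rw [h]; rfl)
    rw [PySem.Dict.items_counter,
      subLoop_spec _ _ _ (PySem.Set.nodup_ofList r.toList)]
    by_cases hall : (PySem.Set.ofList r.toList).all
        (fun k => !((PySem.Dict.counter f.toList).getD k 0 < ((r.toList.count k : Int))))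
    · rw [if_pos hall]
      have hsuff : ∀ c : Char, (r.toList.count c : Int) ≤ f.toList.count c := by
        intro c
        by_cases hc : c ∈ r.toList
        · have := List.all_eq_true.mp hall c ((PySem.Set.mem_ofList _ _).mpr hc)
          simp only [Bool.not_eq_true', decide_eq_false_iff_not, not_lt,
            PySem.Dict.getD_counter] at this
          exact this
        · rw [List.count_eq_zero.mpr hc]; positivity
      set fc' := (PySem.Set.ofList r.toList).foldl
        (fun acc k => acc.modify k 0 (· - (r.toList.count k : Int)))
        (PySem.Dict.counter f.toList) with hfc'
      show pvCounterEq
          (PySem.Dict.counter (fc'.items.foldl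
            (fun acc p => acc ++ (PySem.List.pyRange 0 p.2 1).map (fun _ => p.1))
            ([] : List Char)))
          (PySem.Dict.counter a.toList) = true ↔ _
      have hgetD : ∀ c : Char, fc'.getD c 0 = (f.toList.count c : Int) - r.toList.count c := by
        intro c
        rw [hfc', getD_foldl_modify_sub _ _ _ _ (PySem.Set.nodup_ofList r.toList),
          PySem.Dict.getD_counter]
        by_cases hc : c ∈ r.toList
        · rw [if_pos ((PySem.Set.mem_ofList _ _).mpr hc)]
        · rw [if_neg (fun hh => hc ((PySem.Set.mem_ofList _ _).mp hh)),
            List.count_eq_zero.mpr hc]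
          simp
      have hkeys : fc'.keys = PySem.Set.update (PySem.Dict.counter f.toList).keys
          (PySem.Set.ofList r.toList) := by
        rw [hfc']
        exact PySem.Dict.keys_foldl_modify _ 0
          (fun _ k => (· - (r.toList.count k : Int))) _
      have hndk : fc'.keys.Nodup := by
        rw [hfc']
        exact PySem.Dict.nodup_keys_foldl_modify_key _ (fun x => x) 0
          (fun _ k => (· - (r.toList.count k : Int))) _
          (PySem.Dict.nodup_keys_counter _)
      have hitems : fc'.items = fc'.keys.map (fun k => (k, fc'.getD k 0)) :=
        PySem.Dict.items_eq_map_keys _ hndk 0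
      have hcount : ∀ c : Char,
          ((fc'.items.foldl (fun acc p => acc ++ (PySem.List.pyRange 0 p.2 1).map
            (fun _ => p.1)) ([] : List Char)).count c : Int)
            = (f.toList.count c : Int) - r.toList.count c := by
        intro c
        rw [count_rebuilt_aux, hitems, List.map_map]
        have hfn : ((fun p : Char × Int => if p.1 = c then (p.2).toNat else 0) ∘
            (fun k => (k, fc'.getD k 0))) = fun k => if k = c then (fc'.getD k 0).toNat else 0 := rfl
        rw [hfn, sum_map_ite_nodup _ _ _ hndk]
        by_cases hc : c ∈ fc'.keys
        · rw [if_pos hc, hgetD]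
          have := hsuff c
          simp only [List.count_nil]
          omega
        · rw [if_neg hc]
          rw [hkeys, PySem.Set.mem_update, PySem.Dict.keys_counter,
            PySem.Set.mem_ofList, PySem.Set.mem_ofList] at hc
          push_neg at hc
          rw [List.count_eq_zero.mpr hc.1, List.count_eq_zero.mpr hc.2]
          simp
      rw [counterEq_true_iff _ _ (fun c => getD_counter_not_mem _ c)
        (fun c => getD_counter_not_mem _ c)]
      constructor
      · intro h
        refine ⟨hr0, fun c => ?_⟩
        have h1 := h c
        rw [PySem.Dict.getD_counter, PySem.Dict.getD_counter] at h1
        have h2 := hcount c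
        omega
      · rintro ⟨_, h⟩ c
        rw [PySem.Dict.getD_counter, PySem.Dict.getD_counter]
        have h1 := h c
        have h2 := hcount c
        omega
    · rw [if_neg hall]
      apply iff_of_false
      · exact fun h => Bool.noConfusion h
      · rintro ⟨-, hforall⟩
        rw [List.all_eq_true] at hall
        push_neg at hall
        obtain ⟨c, hc, hlt⟩ := hall
        have hlt' : (f.toList.count c : Int) < r.toList.count c := by
          simpa [PySem.Dict.getD_counter] using hlt
        have h1 := hforall c
        have ha0 : (0 : Int) ≤ a.toList.count c := by positivity
        omega

-- ===== VERDICT (by name: the statement is the Claim_ definition above) =====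
theorem deletion_can_make_answer_py_spec : Claim_equal_deletion_can_make_answer_py := by
  intro f r a _
  unfold Spec_deletion_can_make_answer_py
  have h := (a_iff f r a).trans (alt_iff f r a).symm
  cases hU : deletion_can_make_answer_py f r a <;>
      cases hV : deletion_can_make_answer_py_alt f r a <;> rw [hU, hV] at h <;> simp_all
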